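-- pv_equiv track=rewrite | github.com/PedroScarton/alioo-woocommerce-integration | modules/excel_processing.py | format_category
-- ===== SOURCE A (Python) =====
-- def format_category(categoria_padre, categoria_primaria):
--     # Verificar si existe la categoría padre
--     if categoria_padre:
--         formatted_category = categoria_padre.strip()
--     else:
--         formatted_category = ""
--
--     # Verificar si existe la categoría primaria
--     if categoria_primaria:
--         categorias_primarias = [cat.strip() for cat in categoria_primaria.split(',')]  # Separar por coma y quitar espacios
--         if formatted_category:
--             # Si hay categoría padre, agregar '>' y luego las categorías primarias unidas
--             formatted_category += " > " + " > ".join(categorias_primarias)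
--         else:
--             # Si no hay categoría padre, solo las categorías primarias
--             formatted_category = " > ".join(categorias_primarias)
--
--     return formatted_category
-- ===== SOURCE B (Python) =====
-- def format_category(categoria_padre, categoria_primaria):
--     # Single left-to-right scan: no split()/join(); each comma-delimited piece is
--     # located with find, stripped, and appended to the accumulator directly.
--     res = categoria_padre.strip() if categoria_padre else ""
--     if categoria_primaria:
--         need_sep = res != ""
--         i = 0
--         while True:
--             j = categoria_primaria.find(',', i)
--             piece = (categoria_primaria[i:] if j == -1 else categoria_primaria[i:j]).strip()
--             if need_sep:
--                 res += " > " + piece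
--             else:
--                 res = piece
--                 need_sep = True
--             if j == -1:
--                 break
--             i = j + 1
--     return res
-- ===== Notes on version B (the rewrite author's own statement) =====
-- stated objective: alternative
-- what changed: Replaces A's split()/list-comprehension/join() pipeline by a single left-to-right scan that locates each comma with find, strips the piece, and appends it to the result accumulator directly, with no intermediate list.
import Mathlib
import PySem

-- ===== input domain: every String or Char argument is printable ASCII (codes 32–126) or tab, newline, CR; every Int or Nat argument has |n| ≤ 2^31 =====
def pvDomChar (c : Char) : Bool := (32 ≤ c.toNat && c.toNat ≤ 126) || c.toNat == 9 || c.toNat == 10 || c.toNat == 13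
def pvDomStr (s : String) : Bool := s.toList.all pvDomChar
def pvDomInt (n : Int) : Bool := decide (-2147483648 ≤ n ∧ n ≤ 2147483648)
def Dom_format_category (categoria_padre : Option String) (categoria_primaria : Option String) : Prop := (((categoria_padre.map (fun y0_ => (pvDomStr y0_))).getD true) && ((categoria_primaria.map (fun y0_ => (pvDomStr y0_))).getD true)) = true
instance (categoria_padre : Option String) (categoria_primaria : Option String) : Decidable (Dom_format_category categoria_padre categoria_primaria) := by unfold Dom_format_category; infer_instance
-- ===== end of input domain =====

-- B replaces A's split/list/join pipeline by one left-to-right scan that peels off each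
-- comma-delimited piece, strips it and appends it to the accumulator; objective: alternative
-- algorithm of the same cost.

-- ===== PORT A =====
-- Python truthiness of an Optional[str]: not None and not "".
def pyTruthy (o : Option String) : Bool :=
  match o with
  | some s => !(s == "")
  | none => false

def format_category (categoria_padre : Option String) (categoria_primaria : Option String) : String :=
  let formatted_category :=
    if pyTruthy categoria_padre then PySem.Str.strip (categoria_padre.getD "") else ""
  if pyTruthy categoria_primaria then
    let categorias_primarias :=
      ((PySem.Str.split? (categoria_primaria.getD "") ",").getD []).map PySem.Str.strip
    if formatted_category ≠ "" then
      formatted_category ++ (" > " ++ PySem.Str.join " > " categorias_primarias)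
    else
      PySem.Str.join " > " categorias_primarias
  else
    formatted_category

-- ===== PORT B =====
-- The while-loop of Source B: `cs` is the unprocessed tail of the string (find(',', i) / the
-- slices become takeWhile/dropWhile on the tail), `res` the accumulator, `need` the
-- need_sep flag.  Each iteration takes the piece up to the next comma, strips it and
-- appends it; it stops when no comma is left.
def altGo (cs : List Char) (res : String) (need : Bool) : String :=
  let piece := String.ofList (PySem.Chars.strip (cs.takeWhile (· != ',')))
  let res' := if need then res ++ " > " ++ piece else piece
  let rest := cs.dropWhile (· != ',')
  if rest.isEmpty then res' else altGo rest.tail res' true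
termination_by cs.length
decreasing_by
  have hle := List.length_dropWhile_le (p := (· != ',')) (l := cs)
  have hne : (cs.dropWhile (· != ',')) ≠ [] := by
    intro h0
    apply ‹¬ _›
    have hr : rest = [] := h0
    rw [hr]
    rfl
  have hpos : 0 < (cs.dropWhile (· != ',')).length := List.length_pos_of_ne_nil hne
  simp only [List.length_tail]
  omega

def format_category_alt (categoria_padre : Option String) (categoria_primaria : Option String) : String :=
  let res := if pyTruthy categoria_padre then PySem.Str.strip (categoria_padre.getD "") else ""
  if pyTruthy categoria_primaria then
    altGo (categoria_primaria.getD "").toList res (res != "")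
  else
    res

-- ===== PRECONDITION & SPEC =====
def Spec_format_category (categoria_padre : Option String) (categoria_primaria : Option String) (out : String) : Prop := out = format_category_alt categoria_padre categoria_primaria
instance (categoria_padre : Option String) (categoria_primaria : Option String) (out : String) : Decidable (Spec_format_category categoria_padre categoria_primaria out) := by unfold Spec_format_category; infer_instance

-- ===== CLAIM (what is proved, stated in full; the proofs are below) =====
def Claim_equal_format_category : Prop := ∀ (categoria_padre : Option String) (categoria_primaria : Option String), Dom_format_category categoria_padre categoria_primaria → Spec_format_category categoria_padre categoria_primaria (format_category categoria_padre categoria_primaria)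

-- ===== LEMMAS AND PROOFS =====

-- Structural reference splitter on ',' used only in the proofs.
def splitComma : List Char → List (List Char)
  | [] => [[]]
  | c :: rest =>
    if c = ',' then [] :: splitComma rest
    else
      match splitComma rest with
      | [] => [[c]]
      | p :: ps => (c :: p) :: ps

theorem splitComma_ne_nil (l : List Char) : splitComma l ≠ [] := by
  cases l with
  | nil => simp [splitComma]
  | cons c rest =>
    simp only [splitComma]
    split
    · simp
    · split <;> simp

def headPrepend (pre : List Char) : List (List Char) → List (List Char)
  | [] => []
  | p :: ps => (pre ++ p) :: ps

theorem headPrepend_nil (l : List (List Char)) (h : l ≠ []) : headPrepend [] l = l := by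
  cases l with
  | nil => exact absurd rfl h
  | cons p ps => simp [headPrepend]

theorem splitOn_go_eq (fuel : Nat) (l cur : List Char) (acc : List (List Char))
    (hf : l.length ≤ fuel) :
    PySem.Chars.splitOn.go [','] fuel l cur acc
      = acc.reverse ++ headPrepend cur.reverse (splitComma l) := by
  induction fuel generalizing l cur acc with
  | zero =>
    have : l = [] := List.eq_nil_of_length_eq_zero (Nat.le_zero.mp hf)
    subst this
    simp [PySem.Chars.splitOn.go, splitComma, headPrepend]
  | succ n ih =>
    cases l with
    | nil => simp [PySem.Chars.splitOn.go, splitComma, headPrepend]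
    | cons c rest =>
      rw [PySem.Chars.splitOn.go]
      by_cases hc : c = ','
      · subst hc
        rw [if_pos (by simp [List.isPrefixOf])]
        rw [ih _ _ _ (by simpa using Nat.le_of_succ_le_succ hf)]
        simp only [List.reverse_nil, List.length_cons, List.length_nil, List.drop_succ_cons,
          List.drop_zero]
        rw [headPrepend_nil _ (splitComma_ne_nil rest)]
        rw [show splitComma (',' :: rest) = [] :: splitComma rest from by simp [splitComma]]
        simp [headPrepend, List.reverse_cons, List.append_assoc]
      · rw [if_neg (by simp [List.isPrefixOf]; exact fun h => hc h.symm)]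
        rw [ih _ _ _ (by simpa using Nat.le_of_succ_le_succ hf)]
        simp only [splitComma, if_neg hc]
        cases hsp : splitComma rest with
        | nil => exact absurd hsp (splitComma_ne_nil rest)
        | cons p ps => simp [headPrepend, List.reverse_cons, List.append_assoc]

theorem splitOn_comma (l : List Char) :
    PySem.Chars.splitOn l [','] = splitComma l := by
  rw [PySem.Chars.splitOn, splitOn_go_eq _ _ _ _ (Nat.le_succ_of_le (Nat.le_refl _))]
  cases hsp : splitComma l with
  | nil => exact absurd hsp (splitComma_ne_nil l)
  | cons p ps => simp [headPrepend]

theorem splitComma_cons_struct (l : List Char) :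
    splitComma l
      = (l.takeWhile (· != ','))
        :: (match l.dropWhile (· != ',') with
            | [] => []
            | _ :: r => splitComma r) := by
  induction l with
  | nil => simp [splitComma]
  | cons c rest ih =>
    by_cases hc : c = ','
    · subst hc; simp [splitComma, List.takeWhile, List.dropWhile]
    · simp only [splitComma, if_neg hc, List.takeWhile, List.dropWhile,
        show (c != ',') = true by simpa using hc]
      rw [ih]

theorem strJoin_singleton (sep x : String) : PySem.Str.join sep [x] = x := by
  simp [PySem.Str.join, PySem.Chars.join, List.intercalate]

theorem strJoin_cons_cons (sep x y : String) (rest : List String) :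
    PySem.Str.join sep (x :: y :: rest) = x ++ sep ++ PySem.Str.join sep (y :: rest) := by
  rw [← String.toList_inj]
  simp [PySem.Str.join, PySem.Chars.join_cons_cons]

-- the joined stripped pieces of l
def joined (l : List Char) : String :=
  PySem.Str.join " > " ((splitComma l).map (fun p => String.ofList (PySem.Chars.strip p)))

theorem altGo_eq (l : List Char) (res : String) (need : Bool) :
    altGo l res need = if need then res ++ " > " ++ joined l else joined l := by
  induction hl : l.length using Nat.strong_induction_on generalizing l res need with
  | _ n ih =>
  subst hl
  rw [altGo]
  cases hdw : l.dropWhile (· != ',') with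
  | nil =>
    have hsp := splitComma_cons_struct l
    rw [hdw] at hsp
    simp only [List.isEmpty_nil, if_true, joined, hsp, List.map, strJoin_singleton]
  | cons d rest =>
    have hlt : rest.length < l.length := by
      have hle := List.length_dropWhile_le (p := (· != ',')) (l := l)
      rw [hdw] at hle
      simpa using Nat.lt_of_lt_of_le (Nat.lt_succ_self _) hle
    simp only [List.isEmpty_cons, if_false, List.tail_cons, Bool.false_eq_true]
    rw [ih _ hlt rest _ _ rfl]
    have hsp := splitComma_cons_struct l
    rw [hdw] at hsp
    have hne := splitComma_ne_nil rest
    obtain ⟨q, qs, hq⟩ := List.exists_cons_of_ne_nil hne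
    simp only [joined, hsp, hq, List.map, strJoin_cons_cons, if_pos]
    cases need <;> simp [String.append_assoc]

theorem str_strip_mk (p : List Char) :
    PySem.Str.strip (String.ofList p) = String.ofList (PySem.Chars.strip p) := by
  rw [← String.toList_inj]
  simp [PySem.Str.toList_strip, String.toList_ofList]

theorem split?_comma (s : String) :
    (PySem.Str.split? s ",").getD [] = (splitComma s.toList).map String.ofList := by
  have h := PySem.Str.split?_map s ","
  have hc : PySem.Chars.split? s.toList ",".toList
      = some (PySem.Chars.splitOn s.toList [',']) := by
    simp [PySem.Chars.split?]
  rw [hc] at h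
  cases hsp : PySem.Str.split? s "," with
  | none => rw [hsp] at h; simp at h
  | some xs =>
    rw [hsp] at h
    simp only [Option.map_some] at h
    replace h : xs.map String.toList = splitComma s.toList := by
      rw [← splitOn_comma]; exact Option.some.inj h
    calc (some xs).getD [] = xs := rfl
      _ = (xs.map String.toList).map String.ofList := by
            simp [List.map_map, Function.comp_def, String.ofList_toList]
      _ = (splitComma s.toList).map String.ofList := by rw [h]

-- ===== VERDICT (by name: the statement is the Claim_ definition above) =====
theorem format_category_spec : Claim_equal_format_category := by
  intro cp cs _
  unfold Spec_format_category format_category format_category_alt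
  set f := (if pyTruthy cp = true then PySem.Str.strip (cp.getD "") else "") with hf
  by_cases hcs : pyTruthy cs = true
  · simp only [hcs, if_true]
    rw [altGo_eq]
    have hjoin :
        PySem.Str.join " > "
            (((PySem.Str.split? (cs.getD "") ",").getD []).map PySem.Str.strip)
          = joined (cs.getD "").toList := by
      rw [split?_comma, joined, List.map_map]
      congr 1
      refine List.map_congr_left fun p _ => ?_
      simp [str_strip_mk]
    by_cases hfe : f = ""
    · simp [hfe, hjoin]
    · have : (f != "") = true := by simpa using hfe
      simp [hfe, this, hjoin, String.append_assoc]
  · simp [hcs]
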